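-- pv_equiv track=rewrite | github.com/DVTyuriy/Python_Basic_Lessons | Last_Home_Work/FileProcessor.py | how_to
-- ===== SOURCE A (Python) =====
-- import operator
--
-- def how_to(list1: list, text: str) -> dict:
--     """
--     Фунція. яка рахує кількість товарів, в залежності від операції
--     :param list1: список всїх операцій
--     :param text: вид операції
--     :return: операцій на складі в залежності від операції в сортованому вигляді
--     """
--     population = dict()
--     for row in list1:
--         for ind in row:
--             if ind['operation'] == text:
--                 if ind['warehouse'] not in population:
--                     population[ind['warehouse']] = 0
--                 population[ind['warehouse']] += 1
--     population = dict(sorted(population.items(), key=operator.itemgetter(0)))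
--     return population
-- ===== SOURCE B (Python) =====
-- def how_to(list1: list, text: str) -> dict:
--     """Sort-then-group: collect matching warehouses, sort, count consecutive runs."""
--     items = sorted(ind['warehouse'] for row in list1 for ind in row if ind['operation'] == text)
--     out = {}
--     i, n = 0, len(items)
--     while i < n:
--         j = i
--         while j < n and items[j] == items[i]:
--             j += 1
--         out[items[i]] = j - i
--         i = j
--     return out
-- ===== Notes on version B (the rewrite author's own statement) =====
-- stated objective: alternative
-- what changed: A aggregates counts into a hash map while scanning and then sorts the map's items; B flattens and filters into a flat list of matching warehouse values, sorts that list, and counts consecutive runs (sort-then-group), maintaining no map during counting.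
-- outside the precondition, e.g. on how_to([[{'operation': 'in'}]], 'in'): A raises KeyError, B raises KeyError; on how_to([[{'warehouse': 'w'}]], 'in'): A raises KeyError, B raises KeyError
import Mathlib
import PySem

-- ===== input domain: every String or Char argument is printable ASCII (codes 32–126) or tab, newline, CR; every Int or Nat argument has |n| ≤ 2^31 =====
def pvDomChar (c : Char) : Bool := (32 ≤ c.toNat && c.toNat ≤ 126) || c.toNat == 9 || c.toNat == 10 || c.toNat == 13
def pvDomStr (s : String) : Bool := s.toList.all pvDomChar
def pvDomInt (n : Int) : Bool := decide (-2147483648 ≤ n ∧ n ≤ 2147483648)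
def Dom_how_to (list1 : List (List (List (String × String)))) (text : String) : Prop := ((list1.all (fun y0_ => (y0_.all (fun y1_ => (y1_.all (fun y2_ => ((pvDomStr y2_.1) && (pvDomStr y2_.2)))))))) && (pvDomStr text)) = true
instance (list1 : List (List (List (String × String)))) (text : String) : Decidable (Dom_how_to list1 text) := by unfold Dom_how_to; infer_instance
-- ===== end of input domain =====

-- B replaces A's hash-map aggregation (count into a dict, then sort its items) by
-- sort-then-group: collect the matching warehouse values, sort them, and count
-- consecutive runs; same result, a different (sort-first) algorithm, not faster.

-- shared helper: ind[k] for a Python dict given as an association list (none = KeyError)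
def pvLookup (ind : List (String × String)) (k : String) : Option String :=
  (PySem.Dict.ofList ind).get? k

-- ===== PORT A =====
def how_to (list1 : List (List (List (String × String)))) (text : String) : List (String × Int) :=
  let population := list1.foldl (fun pop row =>
    row.foldl (fun pop ind =>
      match pvLookup ind "operation" with
      | none => pop           -- KeyError; excluded by Pre_
      | some op =>
        if op == text then
          match pvLookup ind "warehouse" with
          | none => pop       -- KeyError; excluded by Pre_
          | some w =>
            -- if w not in population: population[w] = 0
            let pop' := if !(pop.contains w) then pop.insert w 0 else pop
            -- population[w] += 1
            pop'.insert w (pop'.getD w 0 + 1)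
        else pop) pop) (PySem.Dict.empty : PySem.Dict String Int)
  PySem.List.sorted population.items (fun p => p.1) false

-- ===== PORT B =====
-- B's inner while loop: count the run of elements equal to the head, recurse on the rest
def runCounts : List String → List (String × Int)
  | [] => []
  | x :: xs =>
    (x, ((xs.takeWhile (fun y => y == x)).length : Int) + 1) ::
      runCounts (xs.dropWhile (fun y => y == x))
  termination_by s => s.length
  decreasing_by simpa using Nat.lt_succ_of_le (List.length_dropWhile_le _ _)

def how_to_alt (list1 : List (List (List (String × String)))) (text : String) : List (String × Int) :=
  let items := PySem.List.sorted
    ((list1.flatten.filter (fun ind => pvLookup ind "operation" == some text)).filterMap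
      (fun ind => pvLookup ind "warehouse")) (fun x => x) false
  runCounts items

-- ===== PRECONDITION & SPEC =====
-- Pre_ excludes exactly the inputs on which A raises KeyError: an inner dict without an
-- 'operation' key, or one matching the operation but lacking a 'warehouse' key.
def Pre_how_to (list1 : List (List (List (String × String)))) (text : String) : Prop :=
  ∀ row ∈ list1, ∀ ind ∈ row,
    (pvLookup ind "operation").isSome = true ∧
    (pvLookup ind "operation" = some text → (pvLookup ind "warehouse").isSome = true)
instance (list1 : List (List (List (String × String)))) (text : String) : Decidable (Pre_how_to list1 text) := by unfold Pre_how_to; infer_instance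
def pvWitness_how_to : (List (List (List (String × String)))) × String :=
  ([[[("operation", "in"), ("warehouse", "w1")], [("operation", "out")]]], "in")

def Spec_how_to (list1 : List (List (List (String × String)))) (text : String) (out : List (String × Int)) : Prop := out = how_to_alt list1 text
instance (list1 : List (List (List (String × String)))) (text : String) (out : List (String × Int)) : Decidable (Spec_how_to list1 text out) := by unfold Spec_how_to; infer_instance

-- ===== CLAIM (what is proved, stated in full; the proofs are below) =====
def Claim_equal_how_to : Prop := ∀ (list1 : List (List (List (String × String)))) (text : String), Dom_how_to list1 text → Pre_how_to list1 text → Spec_how_to list1 text (how_to list1 text)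

-- ===== LEMMAS AND PROOFS =====

-- the warehouse value A counts (defined whenever Pre_ holds and the operation matches)
def wVal (ind : List (String × String)) : String := (pvLookup ind "warehouse").getD ""

-- A's two-step "ensure key then += 1" is a single counting insert
theorem stepA_eq (pop : PySem.Dict String Int) (w : String) :
    (let pop' := if !(pop.contains w) then pop.insert w 0 else pop
     pop'.insert w (pop'.getD w 0 + 1)) = pop.insert w (pop.getD w 0 + 1) := by
  by_cases h : pop.contains w = true
  · simp [h]
  · simp only [Bool.not_eq_true] at h
    simp [h, PySem.Dict.getD_insert_self, PySem.Dict.insert_insert_self,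
      PySem.Dict.getD_of_not_contains pop 0 h]

theorem filterMap_eq_map_of_some {α β : Type} (l : List α) (f : α → Option β) (g : α → β)
    (h : ∀ x ∈ l, f x = some (g x)) : l.filterMap f = l.map g := by
  induction l with
  | nil => rfl
  | cons x xs ih =>
    simp [h x (by simp), ih (fun y hy => h y (by simp [hy]))]

-- membership/count characterisation of runCounts on a sorted list
theorem runCounts_mem (s : List String) (hs : s.Pairwise (· ≤ ·)) (k : String) (c : Int) :
    (k, c) ∈ runCounts s ↔ k ∈ s ∧ c = (s.count k : Int) := by
  induction s using runCounts.induct with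
  | case1 => simp [runCounts]
  | case2 x xs ih =>
    have hxs : xs.Pairwise (· ≤ ·) := (List.pairwise_cons.mp hs).2
    have hx : ∀ y ∈ xs, x ≤ y := (List.pairwise_cons.mp hs).1
    set t := xs.takeWhile (fun y => y == x) with ht
    set r := xs.dropWhile (fun y => y == x) with hr
    have hsplit : t ++ r = xs := List.takeWhile_append_dropWhile
    have htx : ∀ y ∈ t, y = x := fun y hy => by
      simpa using List.mem_takeWhile_imp hy
    have hrs : r.Pairwise (· ≤ ·) := hxs.sublist (List.dropWhile_sublist _)
    have hxr : ∀ y ∈ r, x < y := by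
      intro y hy
      rcases hrne : r with _ | ⟨y0, r'⟩
      · simp [hrne] at hy
      · have hy0 : (y0 == x) = false := by
          have := List.head_dropWhile_not (fun y => y == x) (l := xs) (by simp [← hr, hrne])
          simpa [← hr, hrne] using this
        have hy0x : y0 ≠ x := by simpa using hy0
        have hxy0 : x < y0 := lt_of_le_of_ne
          (hx y0 (by rw [← hsplit, hrne]; simp)) (Ne.symm hy0x)
        rcases (by simpa [hrne] using hy : y = y0 ∨ y ∈ r') with rfl | hy'
        · exact hxy0
        · exact lt_of_lt_of_le hxy0 ((List.pairwise_cons.mp (hrne ▸ hrs)).1 y hy')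
    have hxnr : x ∉ r := fun h => lt_irrefl x (hxr x h)
    have hcx : (x :: xs).count x = t.length + 1 := by
      rw [← hsplit]
      have : t.count x = t.length := List.count_eq_length.mpr (fun y hy => by
        simp [htx y hy])
      simp [List.count_append, this, List.count_eq_zero.mpr hxnr, Nat.add_comm]
    have hkcount : k ≠ x → (x :: xs).count k = r.count k := by
      intro hkx
      have hxk : ¬ (x = k) := fun h => hkx h.symm
      have htk : t.count k = 0 := List.count_eq_zero.mpr (fun h => hkx (htx k h))
      rw [← hsplit]
      simp [List.count_append, htk, hxk]
    rw [runCounts]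
    constructor
    · rintro h
      rcases List.mem_cons.mp h with heq | hmem
      · obtain ⟨rfl, rfl⟩ : k = x ∧ c = (t.length : Int) + 1 := by
          constructor <;> [exact congrArg Prod.fst heq; exact congrArg Prod.snd heq]
        refine ⟨by simp, by rw [hcx]; push_cast; ring⟩
      · obtain ⟨hkr, rfl⟩ := (ih hrs).mp hmem
        have hkx : k ≠ x := fun h => hxnr (h ▸ hkr)
        have hmemx : k ∈ x :: xs := List.mem_cons_of_mem _ (by rw [← hsplit]; exact List.mem_append.mpr (Or.inr hkr))
        exact ⟨hmemx, by rw [hkcount hkx]⟩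
    · rintro ⟨hk, rfl⟩
      by_cases hkx : k = x
      · subst hkx
        apply List.mem_cons.mpr; left
        rw [hcx]; push_cast; try rfl
        try ring
      · have hkxs : k ∈ xs := by
          rcases List.mem_cons.mp hk with h | h; exact absurd h hkx; exact h
        have hkr : k ∈ r := by
          rcases List.mem_append.mp (by rw [hsplit]; exact hkxs : k ∈ t ++ r) with h | h
          · exact absurd (htx k h) hkx
          · exact h
        exact List.mem_cons.mpr (Or.inr ((ih hrs).mpr ⟨hkr, by rw [hkcount hkx]⟩))

theorem runCounts_pairwise (s : List String) (hs : s.Pairwise (· ≤ ·)) :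
    (runCounts s).Pairwise (fun a b => a.1 < b.1) := by
  induction s using runCounts.induct with
  | case1 => simp [runCounts]
  | case2 x xs ih =>
    have hxs : xs.Pairwise (· ≤ ·) := (List.pairwise_cons.mp hs).2
    have hx : ∀ y ∈ xs, x ≤ y := (List.pairwise_cons.mp hs).1
    set r := xs.dropWhile (fun y => y == x) with hr
    have hrs : r.Pairwise (· ≤ ·) := hxs.sublist (List.dropWhile_sublist _)
    have hxr : ∀ y ∈ r, x < y := by
      intro y hy
      rcases hrne : r with _ | ⟨y0, r'⟩
      · simp [hrne] at hy
      · have hy0 : (y0 == x) = false := by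
          have := List.head_dropWhile_not (fun y => y == x) (l := xs) (by simp [← hr, hrne])
          simpa [← hr, hrne] using this
        have hxy0 : x < y0 := lt_of_le_of_ne
          (hx y0 (by
            have : y0 ∈ r := by simp [hrne]
            exact (List.dropWhile_sublist _).mem (hr ▸ this)))
          (Ne.symm (by simpa using hy0))
        rcases (by simpa [hrne] using hy : y = y0 ∨ y ∈ r') with rfl | hy'
        · exact hxy0
        · exact lt_of_lt_of_le hxy0 ((List.pairwise_cons.mp (hrne ▸ hrs)).1 y hy')
    rw [runCounts]
    refine List.pairwise_cons.mpr ⟨?_, ih hrs⟩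
    rintro ⟨k, c⟩ hmem
    exact hxr k ((runCounts_mem r hrs k c).mp hmem).1

-- ===== VERDICT (by name: the statement is the Claim_ definition above) =====
theorem how_to_spec : Claim_equal_how_to := by
  intro list1 text _ hpre
  unfold Spec_how_to how_to how_to_alt
  -- names for the pieces
  set P : List (String × String) → Bool :=
    fun ind => pvLookup ind "operation" == some text with hP
  set matched := list1.flatten.filter P with hmatched
  have hpre' : ∀ ind ∈ list1.flatten, (pvLookup ind "operation").isSome = true ∧
      (pvLookup ind "operation" = some text → (pvLookup ind "warehouse").isSome = true) := by
    intro ind hind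
    obtain ⟨row, hrow, hind'⟩ := List.mem_flatten.mp hind
    exact hpre row hrow ind hind'
  -- A's nested loops = a counting fold over the matched warehouse values
  have hws : ∀ ind ∈ matched, pvLookup ind "warehouse" = some (wVal ind) := by
    intro ind hind
    obtain ⟨hmem, hp⟩ := List.mem_filter.mp hind
    have hop : pvLookup ind "operation" = some text := by
      simpa [hP] using hp
    have := (hpre' ind hmem).2 hop
    rcases h : pvLookup ind "warehouse" with _ | w
    · rw [h] at this; simp at this
    · simp [wVal, h]
  have hA : (list1.foldl (fun pop row =>
        row.foldl (fun pop ind =>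
          match pvLookup ind "operation" with
          | none => pop
          | some op =>
            if op == text then
              match pvLookup ind "warehouse" with
              | none => pop
              | some w =>
                let pop' := if !(pop.contains w) then pop.insert w 0 else pop
                pop'.insert w (pop'.getD w 0 + 1)
            else pop) pop) (PySem.Dict.empty : PySem.Dict String Int)) =
      PySem.Dict.counter (matched.map wVal) := by
    rw [← List.foldl_flatten]
    have step1 : list1.flatten.foldl (fun pop ind =>
        match pvLookup ind "operation" with
        | none => pop
        | some op =>
          if op == text then
            match pvLookup ind "warehouse" with
            | none => pop
            | some w =>
              let pop' := if !(pop.contains w) then pop.insert w 0 else pop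
              pop'.insert w (pop'.getD w 0 + 1)
          else pop) (PySem.Dict.empty : PySem.Dict String Int) =
        list1.flatten.foldl (fun pop ind =>
          if P ind then pop.insert (wVal ind) (pop.getD (wVal ind) 0 + 1)
          else pop) (PySem.Dict.empty : PySem.Dict String Int) := by
      apply PySem.List.foldl_congr_mem
      intro pop ind hind
      obtain ⟨hopsome, hwh⟩ := hpre' ind hind
      rcases hop : pvLookup ind "operation" with _ | op
      · rw [hop] at hopsome; simp at hopsome
      · by_cases heq : op = text
        · subst heq
          have hpt : P ind = true := by simp [hP, hop]
          have hw := hwh hop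
          rcases hw' : pvLookup ind "warehouse" with _ | w
          · rw [hw'] at hw; simp at hw
          · have hwv : wVal ind = w := by simp [wVal, hw']
            simp only [hpt, hwv, beq_self_eq_true, if_true]
            exact stepA_eq pop w
        · have hpt : P ind = false := by simp [hP, hop, heq]
          simp [hpt, heq]
    rw [step1]
    rw [show (fun (pop : PySem.Dict String Int) ind =>
          if P ind then pop.insert (wVal ind) (pop.getD (wVal ind) 0 + 1) else pop) =
        (fun pop ind => if P ind = true then
          (fun (d : PySem.Dict String Int) x => d.insert x (d.getD x 0 + 1)) pop (wVal ind)
          else pop) from rfl]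
    rw [PySem.List.foldl_ite_eq_foldl_filter (fun ind => P ind = true)]
    rw [show list1.flatten.filter (fun x => decide (P x = true)) = matched by
      simp [hmatched]]
    rw [← PySem.Dict.foldl_insert_getD_add_one_eq_counter]
    exact (List.foldl_map (f := wVal)
      (g := fun (d : PySem.Dict String Int) x => d.insert x (d.getD x 0 + 1))
      (l := matched) (init := PySem.Dict.empty)).symm
  rw [hA]
  -- B's filterMap is the same matched-warehouse list
  have hB : matched.filterMap (fun ind => pvLookup ind "warehouse") = matched.map wVal :=
    filterMap_eq_map_of_some _ _ _ hws
  simp only [hB, PySem.Dict.items_counter]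
  -- both sides are determined by the multiset of matched warehouse values
  set ws := matched.map wVal with hwsdef
  set s := PySem.List.sorted ws (fun x => x) false with hsdef
  have hsp : s.Pairwise (· ≤ ·) := PySem.List.sorted_pairwise ws (fun x => x)
  have hperm : s.Perm ws := PySem.List.sorted_perm ws (fun x => x) false
  -- the sorted items list of the counter IS runCounts s
  apply PySem.List.sorted_eq_of_perm_of_pairwise_lt
  · -- runCounts s ~ (Set.ofList ws).map (k ↦ (k, count))
    have hnd1 : (runCounts s).Nodup :=
      (runCounts_pairwise s hsp).imp (fun h => by
        intro he; rw [he] at h; exact lt_irrefl _ h)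
    have hnd2 : (List.map (fun k => (k, ((ws.count k : Nat) : Int))) (PySem.Set.ofList ws)).Nodup :=
      (PySem.Set.nodup_ofList ws).map (fun a b hab => congrArg Prod.fst hab)
    apply (List.perm_ext_iff_of_nodup hnd1 hnd2).mpr
    rintro ⟨k, c⟩
    rw [runCounts_mem s hsp k c]
    constructor
    · rintro ⟨hk, rfl⟩
      refine List.mem_map.mpr ⟨k, (PySem.Set.mem_ofList ws k).mpr
        ((PySem.List.mem_sorted ws _ false k).mp hk), ?_⟩
      rw [hperm.count_eq]
    · intro h
      obtain ⟨k', hk', heq⟩ := List.mem_map.mp h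
      obtain ⟨rfl, rfl⟩ : k' = k ∧ c = ((ws.count k' : Nat) : Int) := by
        constructor <;> [exact congrArg Prod.fst heq; exact (congrArg Prod.snd heq).symm]
      refine ⟨(PySem.List.mem_sorted ws _ false k').mpr
        ((PySem.Set.mem_ofList ws k').mp hk'), ?_⟩
      rw [hperm.count_eq]
  · exact runCounts_pairwise s hsp
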